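-- pv_equiv track=rewrite | github.com/drPod/Academic-Decathlon-Focus-Quiz-Automation | sort.py | split_questions
-- ===== SOURCE A (Python) =====
-- def split_questions(text):
--     """Split text by question"""
--     # If the start of the line is "e.", then it's the last answer
--     # This function will return just the block of text that contains the question and answers
--     questions = []
--     curr_question = []
--     for line in text.split("\n"):
--         curr_question.append(line)
--         if line.startswith("e."):
--             questions.append("\n".join(curr_question))
--             curr_question = []
--
--     return questions
-- ===== SOURCE B (Python) =====
-- def split_questions(text):
--     """Split text by question"""
--     # Scan-and-cut: find the next line starting with "e.", emit everything up
--     # to and including it as one block, and continue with the remaining lines.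
--     questions = []
--     lines = text.split("\n")
--     while True:
--         i = next((j for j, line in enumerate(lines) if line.startswith("e.")), None)
--         if i is None:
--             return questions
--         questions.append("\n".join(lines[:i + 1]))
--         lines = lines[i + 1:]
-- ===== Notes on version B (the rewrite author's own statement) =====
-- stated objective: alternative
-- what changed: Replaced the line-by-line accumulate-and-flush loop (growing a curr_question buffer per line) with a scan-and-cut loop that finds the index of the next 'e.' line and slices the block out in one step; trailing lines after the last 'e.' are dropped because no boundary is found.
import Mathlib
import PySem

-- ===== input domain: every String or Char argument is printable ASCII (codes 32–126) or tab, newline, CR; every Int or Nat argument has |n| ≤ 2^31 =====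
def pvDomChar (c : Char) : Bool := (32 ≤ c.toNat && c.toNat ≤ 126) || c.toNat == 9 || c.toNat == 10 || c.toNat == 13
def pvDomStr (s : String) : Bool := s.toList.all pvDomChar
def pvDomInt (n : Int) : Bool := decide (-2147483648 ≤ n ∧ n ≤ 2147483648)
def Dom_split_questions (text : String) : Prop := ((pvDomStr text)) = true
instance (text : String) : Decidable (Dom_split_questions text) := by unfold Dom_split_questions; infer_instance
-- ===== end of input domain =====

-- B replaces A's accumulate-and-flush loop with a scan-and-cut loop (find next "e." line, slice the block); same result, alternative structure.

-- ===== PORT A =====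
-- text.split("\n"): sep "\n" ≠ "", so PySem.Str.split? is always `some`
def pySplitNl (s : String) : List String := (PySem.Str.split? s "\n").getD []

-- the for-loop of A over text.split("\n"), state (questions, curr_question)
def splitALoop (lines : List String) (qs curr : List String) : List String :=
  match lines with
  | [] => qs
  | l :: rest =>
    let curr' := curr ++ [l]
    if PySem.Str.startswith l "e." then
      splitALoop rest (qs ++ [PySem.Str.join "\n" curr']) []
    else
      splitALoop rest qs curr'

def split_questions (text : String) : List String :=
  splitALoop (pySplitNl text) [] []

-- ===== PORT B =====
-- B's while-loop: find the index of the next line starting with "e." (the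
-- `next(… enumerate …)` scan = List.findIdx?); lines[:i+1] / lines[i+1:] are
-- exact as take/drop since i+1 is a nonnegative in-range index.
def splitBLoop (lines : List String) : List String :=
  match h : lines.findIdx? (fun l => PySem.Str.startswith l "e.") with
  | none => []
  | some i =>
      PySem.Str.join "\n" (lines.take (i + 1)) :: splitBLoop (lines.drop (i + 1))
termination_by lines.length
decreasing_by
  simp only [List.length_drop]
  simp only [List.findIdx?_eq_some_iff_findIdx_eq] at h
  omega

def split_questions_alt (text : String) : List String :=
  splitBLoop (pySplitNl text)

-- ===== PRECONDITION & SPEC =====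
def Spec_split_questions (text : String) (out : List String) : Prop := out = split_questions_alt text
instance (text : String) (out : List String) : Decidable (Spec_split_questions text out) := by unfold Spec_split_questions; infer_instance

-- ===== CLAIM (what is proved, stated in full; the proofs are below) =====
def Claim_equal_split_questions : Prop := ∀ (text : String), Dom_split_questions text → Spec_split_questions text (split_questions text)

-- ===== LEMMAS AND PROOFS =====

-- what B's loop does to the FIRST block when a prefix `curr` is already pending
def splitBFrom (curr lines : List String) : List String :=
  match lines.findIdx? (fun l => PySem.Str.startswith l "e.") with
  | none => []
  | some i =>
      PySem.Str.join "\n" (curr ++ lines.take (i + 1)) :: splitBLoop (lines.drop (i + 1))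

theorem splitBLoop_eq_from (lines : List String) :
    splitBLoop lines = splitBFrom [] lines := by
  rw [splitBLoop, splitBFrom]
  cases lines.findIdx? (fun l => PySem.Str.startswith l "e.") <;> simp

theorem splitALoop_eq (lines : List String) : ∀ (qs curr : List String),
    splitALoop lines qs curr = qs ++ splitBFrom curr lines := by
  induction lines with
  | nil => intro qs curr; simp [splitALoop, splitBFrom]
  | cons l rest ih =>
    intro qs curr
    simp only [splitALoop]
    by_cases hp : PySem.Str.startswith l "e." = true
    · have hp' : PySem.Chars.startswith l.toList ['e', '.'] = true := by simpa using hp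
      rw [if_pos hp, ih, ← splitBLoop_eq_from]
      simp [splitBFrom.eq_def, List.findIdx?_cons, hp']
    · have hp' : PySem.Chars.startswith l.toList ['e', '.'] = false := by
        simpa using eq_false_of_ne_true hp
      rw [if_neg hp, ih]
      cases hf : List.findIdx? (fun l => PySem.Chars.startswith l.toList ['e', '.']) rest with
      | none => simp [splitBFrom.eq_def, List.findIdx?_cons, hp', hf]
      | some i =>
        simp [splitBFrom.eq_def, List.findIdx?_cons, hp', hf, List.take_succ_cons,
          List.drop_succ_cons]

-- ===== VERDICT (by name: the statement is the Claim_ definition above) =====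
theorem split_questions_spec : Claim_equal_split_questions := by
  intro text _
  unfold Spec_split_questions split_questions split_questions_alt
  rw [splitALoop_eq, splitBLoop_eq_from]
  simp
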